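/-
  THE CONTRACTS OF THE BYTE STREAM, OGG PAGING, PACKETS AND THE BIT READER (c/stb_vorbis_fixed.c; design/CONTRACTS.md entries 41–44,
  45, 46–51, 61, 63–65, 85, 112). Callees of the whole decoder. Predicates: Vorbis/Bits.lean (`Bits Blk len mem f`, the measure
  `mu`, `ReaderPost`, `GetBitsPost`); the shadow clause and `LiveIn`: Vorbis/Spec/Basic.lean.

  GHOST PARAMETERS of every Spec of this file:
      others frames          the live objects of the shadow invariant (`ShadowPre others frames u`)
      Blk                    the block predicate "is an allocated block" of the decoder invariant (`h.bits : Bits Blk len mem f`)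
      len                    the length of the input (a constant of the run)

  THE COMMON PRECONDITION `ReaderPre others frames Blk len u` (f = rdi):
      shadow : ShadowPre others frames u                                   the shadow clause
      env    : ReaderEnv others frames Blk len f                           MEMORY-INDEPENDENT: a caller carries it unchanged
                 live : BlkLive Blk (Live (stackObjs frames ++ others))       = `h.env.live` of every program point
                 obj  : LiveIn others frames f 1808                           `*f` lies inside ONE live object (`error.spec` asks for this form;
                                                                              it also gives "off the text, off the callee's stack": `LiveIn.where_`)
                 inp  : 0 < len → LiveIn others frames IN len                 the input lies inside ONE live object (memcpy's pre, in getn)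
      bits   : Bits Blk len u.mem f

  THE COMMON POSTCONDITION: `ShadowUntouched u.mem v.mem` (SH8), `ReaderPost Blk len u.mem v.mem f` (= `Bits` kept ∧ `mu` not
  increased) — EXCEPT start_page_no_capturepattern, whose μ clause is the BOUND of DECISIONS D-11 — and the function's own clauses.
  "Field X is unchanged" is NOT repeated in a post when the footprint says it: every `writes` below is a list of windows of `*f`
  (and getn's destination), each inside a decode-time hole of `*f` (`InHole`: `Reader.inHole_…`). `first_decode` (`f + 1749`) is never
  written; `acc` / `valid_bits` (`[f + 1764, f + 1772)`) only by get8_packet, get32_packet, get_bits, prep_huffman, start_packet,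
  maybe_start_packet.

  THE WINDOWS (offsets in `*f`):  stream [48,56) · p_first [84,96) · eof [136,140) · error [140,144) · last_page, segment_count,
  segments[], page_flag [1484,1748) · bytes_in_seg [1748,1749) · next_seg [1752,1756) · last_seg, last_seg_which [1756,1764) ·
  acc [1764,1768) · valid_bits [1768,1772) · packet_bytes [1772,1776) · end_seg_with_known_loc, known_loc_for_packet [1776,1784).

  FOREIGN: `stb_vorbis_get_file_offset.spec` (CONTRACTS 45, callee of start_page_no_capturepattern) is S1's, Vorbis/Spec/Alloc.lean: pre
  `ShadowPre ∧ ObjLive others frames f` (bytewise OB1: `ReaderPre.objLive`), post a value of rax, writes nothing.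

  `Spec.frame` = the worst-case stack depth of CONTRACTS' index (own frame + the return address of a call + the callee's depth).

  get_bits HAS TWO SPECS (CONTRACTS 50, Vorbis/Bits.lean §8): `get_bits.spec24` (n ≤ 24: the recursive arm is unreachable) and
  `get_bits.spec` (n ≤ 32, proved with `spec24` as the contract of BOTH recursive calls; `GetBitsPost.combine`).
-/
import Vorbis.Spec.Basic
import Vorbis.Spec.Common
import Vorbis.Spec.Leaves
import Vorbis.Spec.Libc
import Vorbis.Spec.Alloc
import Vorbis.Invariant
namespace Vorbis.Spec
open X86 X86.User Asan

/-! ### The common precondition -/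

/- `ReaderEnv others frames Blk len f` — what a packet-reading call needs besides `Bits` and the shadow clause — is defined in
Vorbis/Spec/Common.lean (next to the hand-over carrier `Hand`, whose projection `Hand.readerEnv` gives it). -/

/-- The environment with more live objects. -/
theorem ReaderEnv.mono {others others' : List Obj} {frames frames' : List (Nat × FrameLayout)} {Blk : Block → Prop}
    {len f : Nat} (h : ReaderEnv others frames Blk len f)
    (hsub : ∀ o, o ∈ stackObjs frames ++ others → o ∈ stackObjs frames' ++ others') :
    ReaderEnv others' frames' Blk len f := by
  refine ⟨?_, h.obj.mono hsub, fun hl => (h.inp hl).mono hsub⟩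
  have hl : ∀ x, Live (stackObjs frames ++ others) x → Live (stackObjs frames' ++ others') x := by
    intro x hx
    obtain ⟨o, ho, hb⟩ := hx
    exact ⟨o, hsub o ho, hb⟩
  exact BlkLive.mono h.live hl

/-- The environment with fewer allocated blocks (`*f` moved, a block predicate restricted). -/
theorem ReaderEnv.reblk {others : List Obj} {frames : List (Nat × FrameLayout)} {Blk Blk' : Block → Prop} {len f : Nat}
    (h : ReaderEnv others frames Blk len f) (hs : ∀ B, Blk' B → Blk B) : ReaderEnv others frames Blk' len f :=
  ⟨h.live.sub hs, h.obj, h.inp⟩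

/-- **THE PRECONDITION OF EVERY READER** (CONTRACTS: "`Bits f`"; implicit in every entry: the shadow clause): `f` is the first
argument. -/
structure ReaderPre (others : List Obj) (frames : List (Nat × FrameLayout)) (Blk : Block → Prop) (len : Nat) (u : State) :
    Prop where
  shadow : ShadowPre others frames u
  env : ReaderEnv others frames Blk len (u.reg .rdi).toNat
  bits : Bits Blk len u.mem (u.reg .rdi).toNat

/-- **Where `*f` is**, as one arithmetic fact for `u_omega`: above the text, inside the data space, off the callee's stack. -/
theorem ReaderPre.where_obj {others : List Obj} {frames : List (Nat × FrameLayout)} {Blk : Block → Prop} {len : Nat} {u : State}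
    (h : ReaderPre others frames Blk len u) :
    0x119d40 ≤ (u.reg .rdi).toNat ∧ (u.reg .rdi).toNat + 1808 ≤ 0xC00000 ∧
      ((u.reg .rsp).toNat + 8 ≤ (u.reg .rdi).toNat ∨ (u.reg .rdi).toNat + 1808 ≤ 0x700000 ∨
        0x800000 ≤ (u.reg .rdi).toNat) := by
  have hw := h.env.obj.where_ h.shadow.inv h.shadow.offText (by decide)
  simp only [Off.sizeof.stb_vorbis] at hw
  exact hw

/-- OB1 in the bytewise form of Vorbis/Spec/Alloc.lean (`ObjLive`): the precondition of stb_vorbis_get_file_offset and of the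
allocator functions. -/
theorem ReaderPre.objLive {others : List Obj} {frames : List (Nat × FrameLayout)} {Blk : Block → Prop} {len : Nat} {u : State}
    (h : ReaderPre others frames Blk len u) : ObjLive others frames (u.reg .rdi).toNat :=
  h.env.live _ h.bits.OB1

/-- A reader may be called again on the state another reader returned (same stack pointer as at the first call, `Bits` from its
post): the loops of get_bits, prep_huffman, flush_packet; the four get8 of get32. -/
theorem ReaderPre.again {others : List Obj} {frames : List (Nat × FrameLayout)} {Blk : Block → Prop} {len : Nat} {u s : State}
    (h : ReaderPre others frames Blk len u) (hsh : ShadowPre others frames s) (hrdi : s.reg .rdi = u.reg .rdi)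
    (hb : Bits Blk len s.mem (u.reg .rdi).toNat) : ReaderPre others frames Blk len s := by
  refine ⟨hsh, ?_, ?_⟩
  · rw [hrdi]
    exact h.env
  · rw [hrdi]
    exact hb

/-! ### The footprints: windows of `*f` -/

namespace Reader

/-- get8, capture_pattern, get32, skip: `stream`, `eof`. -/
def winsByte (f : Nat) : List Span := [⟨f + 48, f + 56⟩, ⟨f + 136, f + 140⟩]

/-- start_page_no_capturepattern, start_page: `stream`, `p_first`, `eof` + `error`, `last_page` … `page_flag`, `next_seg`,
`end_seg_with_known_loc` + `known_loc_for_packet`. -/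
def winsPage (f : Nat) : List Span :=
  [⟨f + 48, f + 56⟩, ⟨f + 84, f + 96⟩, ⟨f + 136, f + 144⟩, ⟨f + 1484, f + 1748⟩, ⟨f + 1752, f + 1756⟩, ⟨f + 1776, f + 1784⟩]

/-- next_segment: start_page's + `bytes_in_seg`, `next_seg`, `last_seg`, `last_seg_which`. -/
def winsSeg (f : Nat) : List Span :=
  [⟨f + 48, f + 56⟩, ⟨f + 84, f + 96⟩, ⟨f + 136, f + 144⟩, ⟨f + 1484, f + 1749⟩, ⟨f + 1752, f + 1764⟩, ⟨f + 1776, f + 1784⟩]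

/-- get8_packet_raw, flush_packet: next_segment's + `packet_bytes`. NOT `acc`, `valid_bits` (`[f + 1764, f + 1772)`). -/
def winsRaw (f : Nat) : List Span :=
  [⟨f + 48, f + 56⟩, ⟨f + 84, f + 96⟩, ⟨f + 136, f + 144⟩, ⟨f + 1484, f + 1749⟩, ⟨f + 1752, f + 1764⟩, ⟨f + 1772, f + 1784⟩]

/-- get8_packet, get32_packet: get8_packet_raw's + `valid_bits`. NOT `acc` (`[f + 1764, f + 1768)`). -/
def winsPacket (f : Nat) : List Span :=
  [⟨f + 48, f + 56⟩, ⟨f + 84, f + 96⟩, ⟨f + 136, f + 144⟩, ⟨f + 1484, f + 1749⟩, ⟨f + 1752, f + 1764⟩, ⟨f + 1768, f + 1784⟩]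

/-- get_bits, prep_huffman: get8_packet_raw's + `acc`, `valid_bits`. -/
def winsBits (f : Nat) : List Span :=
  [⟨f + 48, f + 56⟩, ⟨f + 84, f + 96⟩, ⟨f + 136, f + 144⟩, ⟨f + 1484, f + 1749⟩, ⟨f + 1752, f + 1784⟩]

/-- start_packet, maybe_start_packet: start_page's + `bytes_in_seg`, `last_seg`, `valid_bits`, `packet_bytes`. NOT
`last_seg_which`, `acc` (`[f + 1760, f + 1768)`). -/
def winsStart (f : Nat) : List Span :=
  [⟨f + 48, f + 56⟩, ⟨f + 84, f + 96⟩, ⟨f + 136, f + 144⟩, ⟨f + 1484, f + 1749⟩, ⟨f + 1752, f + 1760⟩, ⟨f + 1768, f + 1784⟩]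

/-- Every window of every reader lies in a decode-time hole of `*f`: the `.hole` case of `StoreOK` for a decode-time caller's
`ConfigOK.frame_stores`. (getn's destination window is the caller's own.) -/
theorem inHole_of_mem (f : Nat) (s : Span)
    (h : s ∈ winsByte f ∨ s ∈ winsPage f ∨ s ∈ winsSeg f ∨ s ∈ winsRaw f ∨ s ∈ winsPacket f ∨ s ∈ winsBits f ∨ s ∈ winsStart f) :
    InHole f s := by
  unfold InHole
  simp only [winsByte, winsPage, winsSeg, winsRaw, winsPacket, winsBits, winsStart, List.mem_cons, List.mem_nil_iff,
    or_false] at h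
  rcases h with h | h | h | h | h | h | h
  all_goals
    rcases h with rfl | h
    · simp only []
      omega
  all_goals
    rcases h with rfl | h
    · simp only []
      omega
  all_goals try
    rcases h with rfl | h
    · simp only []
      omega
  all_goals try
    rcases h with rfl | h
    · simp only []
      omega
  all_goals try
    rcases h with rfl | h
    · simp only []
      omega
  all_goals try
    subst h
    simp only []
    omega

/-- The `StoreOK` form. -/
theorem storeOK_of_mem (Blk : Block → Prop) (mem : Mem) (f : Nat) (s : Span)
    (h : s ∈ winsByte f ∨ s ∈ winsPage f ∨ s ∈ winsSeg f ∨ s ∈ winsRaw f ∨ s ∈ winsPacket f ∨ s ∈ winsBits f ∨ s ∈ winsStart f) :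
    StoreOK Blk mem f s :=
  StoreOK.hole (inHole_of_mem f s h)

end Reader

/-! ### Frame helpers for the callers of the readers (found by the validators of this file's statements) -/

namespace Reader

/-- **What a callee with the footprint of get8 / get32 / capture_pattern / skip / getn-into-`segments[]` leaves alone**: every
window of its footprint is off `*f` (its stack), or inside `stream`, `eof` + `error`, or `segments[]` — so the paging fields and
`stream_end` read the same. (`hs` = the `Returned.same` of the call; start_page_no_capturepattern carries `next_seg ∈ {−1, 0}`
through nine callees with it.) -/
theorem kept_of_callee {mem mem' : Mem} {f : Nat} {ws : List Span} (hf : f + 1808 ≤ 2 ^ 64) (hs : Mem.SameExcept ws mem mem')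
    (hsub : ∀ w, w ∈ ws → (w.hi ≤ f ∨ f + 1808 ≤ w.lo) ∨ (f + 48 ≤ w.lo ∧ w.hi ≤ f + 56) ∨ (f + 136 ≤ w.lo ∧ w.hi ≤ f + 144) ∨
      (f + 1492 ≤ w.lo ∧ w.hi ≤ f + 1748)) :
    stb_vorbis.next_seg mem' f = stb_vorbis.next_seg mem f ∧
      stb_vorbis.segment_count mem' f = stb_vorbis.segment_count mem f ∧
      stb_vorbis.bytes_in_seg mem' f = stb_vorbis.bytes_in_seg mem f ∧
      stb_vorbis.stream_end mem' f = stb_vorbis.stream_end mem f := by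
  have e1 : Mem.EqOn (f + 1752) (f + 1756) mem mem' := by
    apply hs.eqOn
    intro w hw
    have := hsub w hw
    omega
  have e2 : Mem.EqOn (f + 1488) (f + 1492) mem mem' := by
    apply hs.eqOn
    intro w hw
    have := hsub w hw
    omega
  have e3 : Mem.EqOn (f + 1748) (f + 1749) mem mem' := by
    apply hs.eqOn
    intro w hw
    have := hsub w hw
    omega
  have e4 : Mem.EqOn (f + 64) (f + 72) mem mem' := by
    apply hs.eqOn
    intro w hw
    have := hsub w hw
    omega
  refine ⟨?_, ?_, ?_, ?_⟩
  · simp only [vacc, voff]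
    exact e1.i32 _ (by omega) (by omega) (by omega)
  · simp only [vacc, voff]
    exact e2.i32 _ (by omega) (by omega) (by omega)
  · simp only [vacc, voff]
    exact e3.u8 _ (by omega) (by omega) (by omega)
  · simp only [vacc, voff]
    exact e4.u64 _ (by omega) (by omega) (by omega)

/-- `Bits` is kept by stores that all lie in one window off `*f` (the caller's own pushes and spills before a call). -/
theorem bits_of_window {Blk : Block → Prop} {len : Nat} {mem mem' : Mem} {f lo hi : Nat} (h : Bits Blk len mem f)
    (hs : Mem.SameExcept [⟨lo, hi⟩] mem mem') (hoff : hi ≤ f ∨ f + 1808 ≤ lo) : Bits Blk len mem' f := by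
  apply h.frame_fields
  apply Bits.SameFields.of_sameExcept hs
  all_goals
    intro w hw
    have e : w = ⟨lo, hi⟩ := List.mem_singleton.mp hw
    subst e
    simp only []
    omega

/-- **`Bits` and μ over stores that all lie in one window off `*f`** (the caller's own pushes and spills before a call, the push
of a check's return address): the `?bits` of `ReaderPre.again`. Use: `hsame : Mem.SameExcept [⟨rsp - k, rsp⟩] u.mem s.mem := by u_same`,
`hoff` from `ReaderPre.where_obj`. -/
theorem reader_of_window {Blk : Block → Prop} {len : Nat} {mem mem' : Mem} {f lo hi : Nat} (h : Bits Blk len mem f)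
    (hs : Mem.SameExcept [⟨lo, hi⟩] mem mem') (hoff : hi ≤ f ∨ f + 1808 ≤ lo) :
    Bits Blk len mem' f ∧ mu mem' f = mu mem f := by
  have hr := h.OBR
  have hsame : ObjSame f mem mem' := by
    apply ObjSame.of_sameExcept hs (by omega)
    intro w hw
    have e : w = ⟨lo, hi⟩ := List.mem_singleton.mp hw
    subst e
    simp only []
    omega
  exact ⟨h.frame hsame, mu_transfer (hsame.sub (by decide))⟩

/-- **The caller's footprint through a callee's**: every window of the callee lies inside a window of the caller (`ret_same` of a
function that calls a contract function, until `u_same` has this step). The side goal on literal lists: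
`simp only [List.forall_mem_cons, List.not_mem_nil, false_imp_iff, implies_true, and_true, X86.User.inSpans_cons,
X86.User.inSpans_nil, or_false]`, `repeat' apply And.intro`, `all_goals u_omega`. -/
theorem sameExcept_through_callee {ws ws' : List Span} {m0 m1 m2 : Mem} (h : Mem.SameExcept ws m0 m1)
    (hs : Mem.SameExcept ws' m1 m2) (hsub : ∀ w ∈ ws', InSpans ws w.lo (w.hi - w.lo)) : Mem.SameExcept ws m0 m2 := by
  apply h.step_same hs
  intro w hw a h1 h2
  obtain ⟨w', hw', k1, k2⟩ := hsub w hw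
  exact ⟨w', hw', by omega, by omega⟩

/-- A callee's 32-bit result moved through `mov ebp, eax … mov eax, ebp` is the same word. -/
theorem ofBV_part32_of_lt (x : Word) (h : x.toNat < 2 ^ 32) : Word.ofBV (Word.part .w32 x) = x := by
  apply UInt64.toNat_inj.mp
  unfold Word.ofBV Word.part
  simp only [UInt64.toNat_ofBitVec, Width.bits, BitVec.toNat_setWidth, UInt64.toNat_toBitVec]
  omega

/-- **A store off `*f`** (a push, a spill, the return address of a call) keeps `Bits`, μ, `valid_bits` and `acc`. -/
theorem store_off_obj {Blk : Block → Prop} {len : Nat} {mem : Mem} {f : Nat} (h : Bits Blk len mem f) (w : Word) (k v : Nat)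
    (hw : w.toNat + k ≤ 2 ^ 64) (hoff : w.toNat + k ≤ f ∨ f + 1808 ≤ w.toNat) :
    ReaderPost Blk len mem (mem.writeLE w k v) f ∧
      stb_vorbis.valid_bits (mem.writeLE w k v) f = stb_vorbis.valid_bits mem f ∧
      stb_vorbis.acc (mem.writeLE w k v) f = stb_vorbis.acc mem f := by
  have hr := h.OBR
  simp only [voff] at hr
  have hs : Mem.EqOn f (f + 1808) mem (mem.writeLE w k v) := Mem.eqOn_writeLE mem w k v f 1808 hw (by omega)
  have hobj : (objBlock f).Same mem (mem.writeLE w k v) := hs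
  refine ⟨⟨?_, ?_⟩, ?_, ?_⟩
  · exact h.frame_fields (Bits.SameFields.of_same hobj)
  · exact Nat.le_of_eq (mu_frame_obj (by omega) hobj)
  · simp only [vacc, voff]
    exact hs.i32 _ (by omega) (by omega) (by omega)
  · simp only [vacc, voff]
    exact hs.u32 _ (by omega) (by omega) (by omega)

/-- **A callee's contract that REMEMBERS a fact `E` of its entry state in its postcondition** (the argument registers, the stack
pointer at the call: what the callee's footprint and postcondition are stated about). -/
theorem calls_remember {Lay : Layout} {μ : Microarch} {I : State → Prop} {K : Conv} {entry : Word} {s : Spec}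
    (hc : Calls Lay μ I K entry s) (E : State → Prop) :
    Calls Lay μ I K entry ⟨fun v => s.pre v ∧ E v, fun v v' => s.post v v' ∧ E v, s.frame, s.writes⟩ := by
  refine hc.weaken ?_ ?_ (Nat.le_refl _) ?_
  · intro v hv
    exact hv.1
  · intro v v' hv hq
    exact ⟨hq, hv.2⟩
  · intro v _ w hw a h1 h2
    exact ⟨w, List.mem_cons_of_mem _ hw, h1, h2⟩

/-- **An EMPTY first window may be dropped from a footprint** (getn / memcpy / memset with the count 0: the window
`⟨data, data + 0⟩`, of whose position nothing is known, defeats the disjointness side conditions of `SameExcept.eqOn` and `u_eqon`). -/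
theorem sameExcept_drop_empty {w : Span} {ws : List Span} {m m' : Mem} (hw : w.hi ≤ w.lo)
    (h : Mem.SameExcept (w :: ws) m m') : Mem.SameExcept ws m m' := by
  apply h.mono
  intro w' hw' a h1 h2
  rcases List.mem_cons.mp hw' with rfl | hin
  · omega
  · exact ⟨w', hin, h1, h2⟩

/-- **The μ BOUND of start_page_no_capturepattern at its exits** (D-11), from what the walk has at the `ret`: `Bits` of the exit
memory, the function's OWN footprint between entry and exit (no window meets `stream_end` or `bytes_in_seg`), and `stream` not
decreased. The callees' `mu_le` clauses are not needed. -/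
theorem spnc_bound {Blk : Block → Prop} {len : Nat} {mem mem' : Mem} {f : Nat} {ws : List Span} (hb : Bits Blk len mem' f)
    (hs : Mem.SameExcept ws mem mem')
    (hmiss : ∀ w, w ∈ ws → (w.hi ≤ f + 64 ∨ f + 72 ≤ w.lo) ∧ (w.hi ≤ f + 1748 ∨ f + 1749 ≤ w.lo))
    (hle : stb_vorbis.stream mem f ≤ stb_vorbis.stream mem' f) :
    mu mem' f + 65536 * (stb_vorbis.stream mem' f - stb_vorbis.stream mem f) ≤ mu mem f + 255 * 256 := by
  have hr := hb.OBR
  simp only [voff] at hr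
  have e3 : Mem.EqOn (f + 1748) (f + 1749) mem mem' := by
    apply hs.eqOn
    intro w hw
    have := hmiss w hw
    omega
  have e4 : Mem.EqOn (f + 64) (f + 72) mem mem' := by
    apply hs.eqOn
    intro w hw
    have := hmiss w hw
    omega
  have eb : stb_vorbis.bytes_in_seg mem' f = stb_vorbis.bytes_in_seg mem f := by
    simp only [vacc, voff]
    exact e3.u8 _ (by omega) (by omega) (by omega)
  have ee : stb_vorbis.stream_end mem' f = stb_vorbis.stream_end mem f := by
    simp only [vacc, voff]
    exact e4.u64 _ (by omega) (by omega) (by omega)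
  have hS3 := hb.S3.2
  rw [ee] at hS3
  rw [mu_def, mu_def, ee, eb]
  exact muOf_spnc_bound _ _ _ _ _ _ _ _ hle hS3 hb.muK_le

/-- **A reader moved `stream` and nothing else that `Bits` or μ read**: everything of `*f` above `stream` reads the same, the new
`stream` is `s`, inside the input. `Bits` holds again and μ is the pure `muOf` with the new pointer. -/
theorem bits_stream_moved {Blk : Block → Prop} {len : Nat} {mem mem' : Mem} {f : Nat} (h : Bits Blk len mem f)
    (hE : Mem.EqOn (f + 56) (f + 1808) mem mem') (s : Nat) (es : stb_vorbis.stream mem' f = s)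
    (h1 : stb_vorbis.stream_start mem f ≤ s) (h2 : s ≤ stb_vorbis.stream_end mem f) :
    Bits Blk len mem' f ∧
      mu mem' f = muOf (stb_vorbis.stream_end mem f) s (stb_vorbis.segment_count mem f) (stb_vorbis.next_seg mem f)
        (stb_vorbis.bytes_in_seg mem f) := by
  have hr := h.OBR
  simp only [voff] at hr
  have e1 : stb_vorbis.stream_start mem' f = stb_vorbis.stream_start mem f := by
    simp only [vacc, voff]
    exact hE.u64 _ (by omega) (by omega) (by omega)
  have e2 : stb_vorbis.stream_end mem' f = stb_vorbis.stream_end mem f := by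
    simp only [vacc, voff]
    exact hE.u64 _ (by omega) (by omega) (by omega)
  have e4 : stb_vorbis.segment_count mem' f = stb_vorbis.segment_count mem f := by
    simp only [vacc, voff]
    exact hE.i32 _ (by omega) (by omega) (by omega)
  have e5 : stb_vorbis.next_seg mem' f = stb_vorbis.next_seg mem f := by
    simp only [vacc, voff]
    exact hE.i32 _ (by omega) (by omega) (by omega)
  have e6 : stb_vorbis.valid_bits mem' f = stb_vorbis.valid_bits mem f := by
    simp only [vacc, voff]
    exact hE.i32 _ (by omega) (by omega) (by omega)
  have e7 : stb_vorbis.bytes_in_seg mem' f = stb_vorbis.bytes_in_seg mem f := by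
    simp only [vacc, voff]
    exact hE.u8 _ (by omega) (by omega) (by omega)
  constructor
  · apply h.update e1 e2
    · rw [es]
      exact ⟨h1, h2⟩
    · rw [e4]
      exact h.N1
    · rw [e4, e5]
      exact h.N2
    · rw [e6]
      exact h.V1
  · rw [mu_def, es, e2, e4, e5, e7]

/-- μ is unchanged when the bytes `Bits` reads and `bytes_in_seg` are (the no-advance arm of a reader). -/
theorem mu_frame_fields {mem mem' : Mem} {f : Nat} (hf : f + 1808 ≤ 2 ^ 64) (hs : Bits.SameFields mem mem' f)
    (hB : Mem.EqOn (f + 1748) (f + 1749) mem mem') : mu mem' f = mu mem f :=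
  mu_frame hf hs.streams hs.segment_count hs.next_seg hB

/-- `end_seg_with_known_loc` (not a field of `Bits.KeptFields`) through a store to another part of `*f`. -/
theorem end_seg_writeLE {Blk : Block → Prop} {len : Nat} {mem : Mem} {f : Nat} (hb : Bits Blk len mem f) (off k v : Nat)
    (ho : off + k ≤ 1808) (hd : off + k ≤ 1776 ∨ 1780 ≤ off) :
    stb_vorbis.end_seg_with_known_loc (mem.writeLE (addr (f + off)) k v) f = stb_vorbis.end_seg_with_known_loc mem f := by
  have ea := hb.toNat_addr_field off (by omega)
  have hr := hb.OBR
  simp only [voff] at hr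
  simp only [vacc, voff]
  exact Mem.i32_writeLE mem _ k v _ (by omega) (by omega) (by omega)

/-! ### `Bits` and μ over a LIST of windows; one store off `*f` (lemmas that several farm workers had each written) -/

/-- **`Bits` and μ over stores that stay off `*f`, or inside `eof`/`error`, or inside `acc`**: every window of the `SameExcept` is off
the object `[f, f + 1808)`, inside `[f+136, f+144)` (what `error` writes), or inside `[f+1764, f+1768)` (`f->acc`). The list form of
`reader_of_window`; the windows come from ONE `u_same`. Written by codebook_decode_scalar_raw.3 (`reader_windows`). -/
theorem bits_mu_of_windows {Blk : Block → Prop} {len : Nat} {mem mem' : Mem} {f : Nat} {ws : List Span}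
    (h : Bits Blk len mem f) (hs : Mem.SameExcept ws mem mem')
    (hoff : ∀ w, w ∈ ws → (w.hi ≤ f ∨ f + 1808 ≤ w.lo) ∨ (f + 136 ≤ w.lo ∧ w.hi ≤ f + 144) ∨
      (f + 1764 ≤ w.lo ∧ w.hi ≤ f + 1768)) :
    Bits Blk len mem' f ∧ mu mem' f = mu mem f := by
  have hr := h.OBR
  simp only [voff] at hr
  have sf : Bits.SameFields mem mem' f := by
    apply Bits.SameFields.of_sameExcept hs
    all_goals
      intro w hw
      have := hoff w hw
      omega
  have hB : Mem.EqOn (f + 1748) (f + 1749) mem mem' := by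
    apply hs.eqOn
    intro w hw
    have := hoff w hw
    omega
  exact ⟨h.frame_fields sf, Reader.mu_frame_fields (by omega) sf hB⟩

/-- **A store off `*f`** (the return address of a call, a spill) keeps `Bits`, μ and `stream`: the one-store case with `stream`, which
`store_off_obj` does not give. Written by capture_pattern (`push_off_obj`); get32's `BetweenCalls.store` re-derives `stream` the same way. -/
theorem bits_mu_stream_of_store {Blk : Block → Prop} {len : Nat} {mem : Mem} {f : Nat} (h : Bits Blk len mem f) (w : Word) (k v : Nat)
    (hw : w.toNat + k ≤ 2 ^ 64) (hoff : w.toNat + k ≤ f ∨ f + 1808 ≤ w.toNat) :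
    Bits Blk len (mem.writeLE w k v) f ∧ mu (mem.writeLE w k v) f = mu mem f ∧
      stb_vorbis.stream (mem.writeLE w k v) f = stb_vorbis.stream mem f := by
  have hr := h.OBR
  simp only [voff] at hr
  have hs : Mem.EqOn f (f + 1808) mem (mem.writeLE w k v) := Mem.eqOn_writeLE mem w k v f 1808 hw (by omega)
  have hobj : (objBlock f).Same mem (mem.writeLE w k v) := hs
  refine ⟨?_, ?_, ?_⟩
  · exact h.frame_fields (Bits.SameFields.of_same hobj)
  · exact mu_frame_obj (by omega) hobj
  · simp only [vacc, voff]
    exact hs.u64 _ (by omega) (by omega) (by omega)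

end Reader

/-! ### The byte stream: get8, capture_pattern, get32, getn, skip -/

/-- The postcondition of `get8` for the object address `f`. -/
structure Get8Post (Blk : Block → Prop) (len : Nat) (f : Nat) (u v : State) : Prop where
  untouched : ShadowUntouched u.mem v.mem
  /-- `Bits f` kept (S3 = `stream_start ≤ stream ≤ stream_end`), μ not increased -/
  reader : ReaderPost Blk len u.mem v.mem f
  /-- eax ∈ [0, 255] (`movzx eax, BYTE PTR …` / `mov eax, 0`: the whole of rax) -/
  byte : (v.reg .rax).toNat < 256
  /-- `stream <u stream_end` (the `jb`): the byte at the OLD stream pointer, `stream′ = stream + 1`, R of μ down by 1 -/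
  more : stb_vorbis.stream u.mem f < stb_vorbis.stream_end u.mem f →
    stb_vorbis.stream v.mem f = stb_vorbis.stream u.mem f + 1 ∧
    (v.reg .rax).toNat = u.mem.u8 (stb_vorbis.stream u.mem f) ∧
    mu v.mem f + 65536 ≤ mu u.mem f
  /-- else: 0, `eof = 1`, `stream` unchanged -/
  atEnd : stb_vorbis.stream_end u.mem f ≤ stb_vorbis.stream u.mem f →
    stb_vorbis.stream v.mem f = stb_vorbis.stream u.mem f ∧ v.reg .rax = 0 ∧ stb_vorbis.eof v.mem f = 1

/-- **get8 returns 0 unless it advanced** (the fact behind "four matching bytes = four real bytes": the constants of the capture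
pattern are non-zero). -/
theorem Get8Post.adv {Blk : Block → Prop} {len f : Nat} {u v : State} (h : Get8Post Blk len f u v)
    (hne : v.reg .rax ≠ 0) :
    stb_vorbis.stream v.mem f = stb_vorbis.stream u.mem f + 1 ∧ mu v.mem f + 65536 ≤ mu u.mem f := by
  by_cases hlt : stb_vorbis.stream u.mem f < stb_vorbis.stream_end u.mem f
  · have hm := h.more hlt
    exact ⟨hm.1, hm.2.2⟩
  · have he := h.atEnd (by omega)
    exact absurd he.2.1 hne

/-- `stream` never moves backwards, and by at most one byte. -/
theorem Get8Post.stream_le {Blk : Block → Prop} {len f : Nat} {u v : State} (h : Get8Post Blk len f u v) :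
    stb_vorbis.stream u.mem f ≤ stb_vorbis.stream v.mem f ∧ stb_vorbis.stream v.mem f ≤ stb_vorbis.stream u.mem f + 1 := by
  by_cases hlt : stb_vorbis.stream u.mem f < stb_vorbis.stream_end u.mem f
  · have hm := h.more hlt
    omega
  · have he := h.atEnd (by omega)
    omega

/-- **`get8(rdi = f)`** (CONTRACTS 41): pre `Bits f` (uses OB1, S1, S2, S3). If `stream <u stream_end` (unsigned 64-bit `jb`):
eax = the byte at the OLD stream ∈ [0,255], `stream' = stream + 1` (≤ stream_end); else eax = 0, `[f+136] eof = 1`, stream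
unchanged. `Bits f` kept. R (of μ) decreases by 1 in the first case, is unchanged in the second. Footprint `[f+48, f+56)` stream,
`[f+136, f+140)` eof; stack depth 48. -/
def get8.spec (others : List Obj) (frames : List (Nat × FrameLayout)) (Blk : Block → Prop) (len : Nat) : Spec where
  pre u := ReaderPre others frames Blk len u
  post u v := Get8Post Blk len (u.reg .rdi).toNat u v
  frame := 48
  writes u := Reader.winsByte (u.reg .rdi).toNat

@[vspec] theorem get8.spec_frame (others : List Obj) (frames : List (Nat × FrameLayout)) (Blk : Block → Prop) (len : Nat) :
    (get8.spec others frames Blk len).frame = 48 := id rfl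

@[vspec] theorem get8.spec_writes (others : List Obj) (frames : List (Nat × FrameLayout)) (Blk : Block → Prop) (len : Nat)
    (u : State) : (get8.spec others frames Blk len).writes u =
      [⟨(u.reg .rdi).toNat + 48, (u.reg .rdi).toNat + 56⟩, ⟨(u.reg .rdi).toNat + 136, (u.reg .rdi).toNat + 140⟩] := id rfl

/-- The postcondition of `capture_pattern`. -/
structure CapturePost (Blk : Block → Prop) (len : Nat) (f : Nat) (u v : State) : Prop where
  untouched : ShadowUntouched u.mem v.mem
  reader : ReaderPost Blk len u.mem v.mem f
  /-- eax = 1 (the four bytes matched) or 0 (the first mismatch) -/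
  result : v.reg .rax = 0 ∨ v.reg .rax = 1
  /-- `stream` only moves forward, by at most four bytes -/
  stream_le : stb_vorbis.stream u.mem f ≤ stb_vorbis.stream v.mem f ∧
    stb_vorbis.stream v.mem f ≤ stb_vorbis.stream u.mem f + 4
  /-- eax = 1: `stream` advanced by EXACTLY 4 and each byte was really read (R of μ down by 4) -/
  matched : v.reg .rax = 1 →
    stb_vorbis.stream v.mem f = stb_vorbis.stream u.mem f + 4 ∧ mu v.mem f + 4 * 65536 ≤ mu u.mem f

/-- **`capture_pattern(rdi = f)`** (CONTRACTS 42): pre `Bits f`. eax = 1 iff the next four get8 gave 4F 67 67 53 (then stream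
advanced by exactly 4 and each byte was really read: get8 returns 0 unless it advanced, and the constants are non-zero ⇒ R
decreased by ≥ 4); eax = 0 at the first mismatch. `Bits f` kept. Footprint: stream, eof; stack depth 64. (The "iff" on the byte
VALUES is not stated: no caller's safety depends on it.) -/
def capture_pattern.spec (others : List Obj) (frames : List (Nat × FrameLayout)) (Blk : Block → Prop) (len : Nat) : Spec where
  pre u := ReaderPre others frames Blk len u
  post u v := CapturePost Blk len (u.reg .rdi).toNat u v
  frame := 64
  writes u := Reader.winsByte (u.reg .rdi).toNat

@[vspec] theorem capture_pattern.spec_frame (others : List Obj) (frames : List (Nat × FrameLayout)) (Blk : Block → Prop)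
    (len : Nat) : (capture_pattern.spec others frames Blk len).frame = 64 := id rfl

@[vspec] theorem capture_pattern.spec_writes (others : List Obj) (frames : List (Nat × FrameLayout)) (Blk : Block → Prop)
    (len : Nat) (u : State) : (capture_pattern.spec others frames Blk len).writes u =
      [⟨(u.reg .rdi).toNat + 48, (u.reg .rdi).toNat + 56⟩, ⟨(u.reg .rdi).toNat + 136, (u.reg .rdi).toNat + 140⟩] := id rfl

/-- The postcondition of `get32`. -/
structure Get32Post (Blk : Block → Prop) (len : Nat) (f : Nat) (u v : State) : Prop where
  untouched : ShadowUntouched u.mem v.mem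
  reader : ReaderPost Blk len u.mem v.mem f
  /-- eax = any u32 (`add eax, ebx` writes the whole of rax) -/
  result : (v.reg .rax).toNat < 2 ^ 32
  /-- `stream` only moves forward, by at most four bytes -/
  stream_le : stb_vorbis.stream u.mem f ≤ stb_vorbis.stream v.mem f ∧
    stb_vorbis.stream v.mem f ≤ stb_vorbis.stream u.mem f + 4

/-- **`get32(rdi = f)`** (CONTRACTS 43): pre as get8. eax = the four get8 results combined little-endian (any u32); S3 kept.
Footprint: get8's; stack depth 80. -/
def get32.spec (others : List Obj) (frames : List (Nat × FrameLayout)) (Blk : Block → Prop) (len : Nat) : Spec where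
  pre u := ReaderPre others frames Blk len u
  post u v := Get32Post Blk len (u.reg .rdi).toNat u v
  frame := 80
  writes u := Reader.winsByte (u.reg .rdi).toNat

@[vspec] theorem get32.spec_frame (others : List Obj) (frames : List (Nat × FrameLayout)) (Blk : Block → Prop) (len : Nat) :
    (get32.spec others frames Blk len).frame = 80 := id rfl

@[vspec] theorem get32.spec_writes (others : List Obj) (frames : List (Nat × FrameLayout)) (Blk : Block → Prop) (len : Nat)
    (u : State) : (get32.spec others frames Blk len).writes u =
      [⟨(u.reg .rdi).toNat + 48, (u.reg .rdi).toNat + 56⟩, ⟨(u.reg .rdi).toNat + 136, (u.reg .rdi).toNat + 140⟩] := id rfl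

/-- **Where getn's destination may lie relative to `*f` and the input**: off the input; and off `*f`, or inside `segments[255]`
(`[f + 1492, f + 1747)`: the call of start_page_no_capturepattern) — so the copy touches no field `Bits` or μ reads. -/
structure GetnDest (len f data n : Nat) : Prop where
  offInput : IN + len ≤ data ∨ data + n ≤ IN
  offFields : data + n ≤ f ∨ f + 1808 ≤ data ∨ (f + 1492 ≤ data ∧ data + n ≤ f + 1747)

/-- The precondition of `getn`. -/
structure GetnPre (others : List Obj) (frames : List (Nat × FrameLayout)) (Blk : Block → Prop) (len : Nat) (u : State) :
    Prop where
  reader : ReaderPre others frames Blk len u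
  /-- `0 ≤ n` -/
  nonneg : 0 ≤ argInt (u.reg .rdx)
  /-- `Live(data, n)` -/
  dest : (argInt (u.reg .rdx)).toNat = 0 ∨ LiveIn others frames (u.reg .rsi).toNat (argInt (u.reg .rdx)).toNat
  /-- data disjoint from IN (and from the fields of `*f` that `Bits` reads) -/
  apart : GetnDest len (u.reg .rdi).toNat (u.reg .rsi).toNat (argInt (u.reg .rdx)).toNat

/-- The postcondition of `getn` for the object address `f`, the destination `data` and the count `n`. -/
structure GetnPost (Blk : Block → Prop) (len : Nat) (f data : Nat) (n : Int) (u v : State) : Prop where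
  untouched : ShadowUntouched u.mem v.mem
  reader : ReaderPost Blk len u.mem v.mem f
  result : v.reg .rax = 0 ∨ v.reg .rax = 1
  /-- `n ≤ stream_end − stream` (LENGTHS are compared): the `n` input bytes at `stream` are copied, `stream += n`, eax = 1 -/
  fits : n ≤ (stb_vorbis.stream_end u.mem f : Int) - (stb_vorbis.stream u.mem f : Int) →
    v.reg .rax = 1 ∧
    stb_vorbis.stream v.mem f = stb_vorbis.stream u.mem f + n.toNat ∧
    (∀ i, i < n.toNat → v.mem.u8 (data + i) = u.mem.u8 (stb_vorbis.stream u.mem f + i)) ∧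
    mu v.mem f + 65536 * n.toNat ≤ mu u.mem f
  /-- else `eof = 1`, eax = 0, nothing copied, `stream` unchanged -/
  short : (stb_vorbis.stream_end u.mem f : Int) - (stb_vorbis.stream u.mem f : Int) < n →
    v.reg .rax = 0 ∧ stb_vorbis.stream v.mem f = stb_vorbis.stream u.mem f ∧ stb_vorbis.eof v.mem f = 1

/-- What a caller that tested `eax ≠ 0` knows. -/
theorem GetnPost.of_ne_zero {Blk : Block → Prop} {len f data : Nat} {n : Int} {u v : State}
    (h : GetnPost Blk len f data n u v) (hne : v.reg .rax ≠ 0) :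
    stb_vorbis.stream v.mem f = stb_vorbis.stream u.mem f + n.toNat ∧ mu v.mem f + 65536 * n.toNat ≤ mu u.mem f := by
  by_cases hle : n ≤ (stb_vorbis.stream_end u.mem f : Int) - (stb_vorbis.stream u.mem f : Int)
  · have hf := h.fits hle
    exact ⟨hf.2.1, hf.2.2.2⟩
  · have hs := h.short (by omega)
    exact absurd hs.1 hne

/-- `stream` never moves backwards. -/
theorem GetnPost.stream_le {Blk : Block → Prop} {len f data : Nat} {n : Int} {u v : State}
    (h : GetnPost Blk len f data n u v) : stb_vorbis.stream u.mem f ≤ stb_vorbis.stream v.mem f := by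
  by_cases hle : n ≤ (stb_vorbis.stream_end u.mem f : Int) - (stb_vorbis.stream u.mem f : Int)
  · have hf := h.fits hle
    omega
  · have hs := h.short (by omega)
    omega

/-- **`getn(rdi = f, rsi = data, edx = n)`** (CONTRACTS 44; FIX 20): pre `Bits f`, `0 ≤ n`, `Live(data, n)`, data disjoint from
IN. If `n ≤ stream_end − stream` (LENGTHS are compared: signed 64-bit `cmp r14,r12 ; jle`): `data[0..n)` = the n input bytes at
stream, `stream += n` (≤ stream_end), eax = 1; else `eof = 1`, eax = 0, nothing copied, stream unchanged. `Bits f` kept (S3).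
`n = 0` always succeeds and copies nothing. Footprint `[data, data+n)`, stream, eof; stack depth 128.
ADDED to the pre (`GetnDest.offFields`): the destination is off `*f` or inside `segments[255]` — the entry's "for `data = f+1492`
N1 gives `n ≤ 255` so the copy stays inside `segments[255]`" made a clause; without it `Bits f` is not kept. -/
def getn.spec (others : List Obj) (frames : List (Nat × FrameLayout)) (Blk : Block → Prop) (len : Nat) : Spec where
  pre u := GetnPre others frames Blk len u
  post u v := GetnPost Blk len (u.reg .rdi).toNat (u.reg .rsi).toNat (argInt (u.reg .rdx)) u v
  frame := 128
  writes u := ⟨(u.reg .rsi).toNat, (u.reg .rsi).toNat + (argInt (u.reg .rdx)).toNat⟩ :: Reader.winsByte (u.reg .rdi).toNat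

@[vspec] theorem getn.spec_frame (others : List Obj) (frames : List (Nat × FrameLayout)) (Blk : Block → Prop) (len : Nat) :
    (getn.spec others frames Blk len).frame = 128 := id rfl

@[vspec] theorem getn.spec_writes (others : List Obj) (frames : List (Nat × FrameLayout)) (Blk : Block → Prop) (len : Nat)
    (u : State) : (getn.spec others frames Blk len).writes u =
      [⟨(u.reg .rsi).toNat, (u.reg .rsi).toNat + (argInt (u.reg .rdx)).toNat⟩,
       ⟨(u.reg .rdi).toNat + 48, (u.reg .rdi).toNat + 56⟩, ⟨(u.reg .rdi).toNat + 136, (u.reg .rdi).toNat + 140⟩] := id rfl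

/-- The postcondition of `skip`. -/
structure SkipPost (Blk : Block → Prop) (len : Nat) (f : Nat) (n : Int) (u v : State) : Prop where
  untouched : ShadowUntouched u.mem v.mem
  reader : ReaderPost Blk len u.mem v.mem f
  /-- `stream' = stream + min(n, stream_end − stream)`: the stream pointer NEVER passes the end -/
  stream : stb_vorbis.stream v.mem f =
    stb_vorbis.stream u.mem f + skipLen n (stb_vorbis.stream_end u.mem f) (stb_vorbis.stream u.mem f)
  /-- `eof = 1` when the end was reached (`cmp rbp,r12 ; jb`) … -/
  atEnd : stb_vorbis.stream v.mem f = stb_vorbis.stream_end u.mem f → stb_vorbis.eof v.mem f = 1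
  /-- … and untouched otherwise -/
  before : stb_vorbis.stream v.mem f < stb_vorbis.stream_end u.mem f → stb_vorbis.eof v.mem f = stb_vorbis.eof u.mem f

/-- **`skip(rdi = f, esi = n)`** (CONTRACTS 85; FIX 20): pre `Bits f`, `0 ≤ n`. `stream' = stream + min(n, stream_end − stream)`
— the stream pointer NEVER passes the end: S3 is kept, `Bits f` kept; `eof = 1` iff `stream' = stream_end` (stated as: set when
the end is reached, untouched otherwise — `eof` may have been 1 before). R (of μ) does not increase. Footprint: stream, eof;
stack depth 64. -/
def skip.spec (others : List Obj) (frames : List (Nat × FrameLayout)) (Blk : Block → Prop) (len : Nat) : Spec where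
  pre u := ReaderPre others frames Blk len u ∧ 0 ≤ argInt (u.reg .rsi)
  post u v := SkipPost Blk len (u.reg .rdi).toNat (argInt (u.reg .rsi)) u v
  frame := 64
  writes u := Reader.winsByte (u.reg .rdi).toNat

@[vspec] theorem skip.spec_frame (others : List Obj) (frames : List (Nat × FrameLayout)) (Blk : Block → Prop) (len : Nat) :
    (skip.spec others frames Blk len).frame = 64 := id rfl

@[vspec] theorem skip.spec_writes (others : List Obj) (frames : List (Nat × FrameLayout)) (Blk : Block → Prop) (len : Nat)
    (u : State) : (skip.spec others frames Blk len).writes u =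
      [⟨(u.reg .rdi).toNat + 48, (u.reg .rdi).toNat + 56⟩, ⟨(u.reg .rdi).toNat + 136, (u.reg .rdi).toNat + 140⟩] := id rfl

/-! ### Ogg paging: start_page_no_capturepattern, start_page, next_segment -/

/-- `next_seg ∈ {−1, 0}`: the extra precondition of the two page starters. -/
def AtPageBoundary (mem : Mem) (f : Nat) : Prop :=
  stb_vorbis.next_seg mem f = -1 ∨ stb_vorbis.next_seg mem f = 0

/-- The postcondition of `start_page_no_capturepattern`. NO `mu_le`: the μ clause is the BOUND of DECISIONS D-11. -/
structure PageNoCapturePost (Blk : Block → Prop) (len : Nat) (f : Nat) (u v : State) : Prop where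
  untouched : ShadowUntouched u.mem v.mem
  /-- `Bits f` kept (S3 from get8, getn; N1, N2 because `next_seg ∈ {−1, 0}` when `segment_count` is replaced) -/
  bits : Bits Blk len v.mem f
  result : v.reg .rax = 0 ∨ v.reg .rax = 1
  /-- `stream` never decreases -/
  stream_le : stb_vorbis.stream u.mem f ≤ stb_vorbis.stream v.mem f
  /-- **μ′ + 2^16·(bytes consumed) ≤ μ + 255·2^8** (`muOf_spnc_bound`): NOT non-increasing by itself -/
  bound : mu v.mem f + 65536 * (stb_vorbis.stream v.mem f - stb_vorbis.stream u.mem f) ≤ mu u.mem f + 255 * 256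
  /-- eax = 1: `next_seg = 0`; `end_seg_with_known_loc ∈ {−2} ∪ [0, segment_count)` -/
  started : v.reg .rax = 1 →
    stb_vorbis.next_seg v.mem f = 0 ∧
    (stb_vorbis.end_seg_with_known_loc v.mem f = -2 ∨
      (0 ≤ stb_vorbis.end_seg_with_known_loc v.mem f ∧
        stb_vorbis.end_seg_with_known_loc v.mem f < stb_vorbis.segment_count v.mem f))
  /-- eax = 0 (error 31 or 10): `next_seg` unchanged -/
  failed : v.reg .rax = 0 → stb_vorbis.next_seg v.mem f = stb_vorbis.next_seg u.mem f

/-- **`start_page_no_capturepattern(rdi = f)`** (CONTRACTS 46): pre `Bits f` ∧ `next_seg ∈ {−1, 0}`. eax = 0: error = 31 (first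
get8 ≠ 0) or 10 (getn failed); next_seg unchanged; segment_count possibly replaced by a byte (N1, N2 still hold because
next_seg ∈ {−1,0}). eax = 1: next_seg = 0; 0 ≤ segment_count ≤ 255; end_seg_with_known_loc ∈ {−2} ∪ [0, segment_count). `Bits f`
kept. μ: stream never decreases, bytes_in_seg unchanged, K′ ≤ 255, so μ′ ≤ μ + 255·2^8 − 2^16·(bytes consumed); NOT
non-increasing by itself when next_seg = −1. Footprint: p_first, page_flag, last_page, segment_count, segments[], end_seg_with_
known_loc, known_loc_for_packet, next_seg, stream, eof, error; stack depth 176. (Not stated: `segments[0..segment_count)` are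
input bytes, the error codes — values no caller's safety depends on.) -/
def start_page_no_capturepattern.spec (others : List Obj) (frames : List (Nat × FrameLayout)) (Blk : Block → Prop)
    (len : Nat) : Spec where
  pre u := ReaderPre others frames Blk len u ∧ AtPageBoundary u.mem (u.reg .rdi).toNat
  post u v := PageNoCapturePost Blk len (u.reg .rdi).toNat u v
  frame := 176
  writes u := Reader.winsPage (u.reg .rdi).toNat

@[vspec] theorem start_page_no_capturepattern.spec_frame (others : List Obj) (frames : List (Nat × FrameLayout))
    (Blk : Block → Prop) (len : Nat) : (start_page_no_capturepattern.spec others frames Blk len).frame = 176 := id rfl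

@[vspec] theorem start_page_no_capturepattern.spec_writes (others : List Obj) (frames : List (Nat × FrameLayout))
    (Blk : Block → Prop) (len : Nat) (u : State) : (start_page_no_capturepattern.spec others frames Blk len).writes u =
      [⟨(u.reg .rdi).toNat + 48, (u.reg .rdi).toNat + 56⟩, ⟨(u.reg .rdi).toNat + 84, (u.reg .rdi).toNat + 96⟩,
       ⟨(u.reg .rdi).toNat + 136, (u.reg .rdi).toNat + 144⟩, ⟨(u.reg .rdi).toNat + 1484, (u.reg .rdi).toNat + 1748⟩,
       ⟨(u.reg .rdi).toNat + 1752, (u.reg .rdi).toNat + 1756⟩, ⟨(u.reg .rdi).toNat + 1776, (u.reg .rdi).toNat + 1784⟩] := id rfl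

/-- The postcondition of `start_page`. -/
structure StartPagePost (Blk : Block → Prop) (len : Nat) (f : Nat) (u v : State) : Prop where
  untouched : ShadowUntouched u.mem v.mem
  /-- `Bits f` kept; the COMPOSITION does not increase μ (capture_pattern consumed 4 real bytes before the page header) -/
  reader : ReaderPost Blk len u.mem v.mem f
  result : v.reg .rax = 0 ∨ v.reg .rax = 1
  /-- eax = 1: `next_seg = 0`, and μ is STRICTLY smaller -/
  started : v.reg .rax = 1 → stb_vorbis.next_seg v.mem f = 0 ∧ mu v.mem f < mu u.mem f
  /-- eax = 0 (error 30, or the callee's failure): `next_seg` unchanged -/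
  failed : v.reg .rax = 0 → stb_vorbis.next_seg v.mem f = stb_vorbis.next_seg u.mem f

/-- **`start_page(rdi = f)`** (CONTRACTS 47): pre `Bits f`, `next_seg ∈ {−1, 0}`. capture_pattern then
start_page_no_capturepattern's post; or `error = VORBIS_missing_capture_pattern (30)`, eax = 0, paging fields unchanged. `Bits f`
kept. (CONTRACTS 48, callees: "net mu strictly smaller on 1, ≤ on 0".) Footprint: as start_page_no_capturepattern + error; stack
depth 192. -/
def start_page.spec (others : List Obj) (frames : List (Nat × FrameLayout)) (Blk : Block → Prop) (len : Nat) : Spec where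
  pre u := ReaderPre others frames Blk len u ∧ AtPageBoundary u.mem (u.reg .rdi).toNat
  post u v := StartPagePost Blk len (u.reg .rdi).toNat u v
  frame := 192
  writes u := Reader.winsPage (u.reg .rdi).toNat

@[vspec] theorem start_page.spec_frame (others : List Obj) (frames : List (Nat × FrameLayout)) (Blk : Block → Prop)
    (len : Nat) : (start_page.spec others frames Blk len).frame = 192 := id rfl

@[vspec] theorem start_page.spec_writes (others : List Obj) (frames : List (Nat × FrameLayout)) (Blk : Block → Prop)
    (len : Nat) (u : State) : (start_page.spec others frames Blk len).writes u =
      [⟨(u.reg .rdi).toNat + 48, (u.reg .rdi).toNat + 56⟩, ⟨(u.reg .rdi).toNat + 84, (u.reg .rdi).toNat + 96⟩,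
       ⟨(u.reg .rdi).toNat + 136, (u.reg .rdi).toNat + 144⟩, ⟨(u.reg .rdi).toNat + 1484, (u.reg .rdi).toNat + 1748⟩,
       ⟨(u.reg .rdi).toNat + 1752, (u.reg .rdi).toNat + 1756⟩, ⟨(u.reg .rdi).toNat + 1776, (u.reg .rdi).toNat + 1784⟩] := id rfl

/-- The postcondition of `next_segment`. -/
structure NextSegmentPost (Blk : Block → Prop) (len : Nat) (f : Nat) (u v : State) : Prop where
  untouched : ShadowUntouched u.mem v.mem
  reader : ReaderPost Blk len u.mem v.mem f
  /-- eax ∈ [0, 255] -/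
  byte : (v.reg .rax).toNat < 256
  /-- `last_seg ≠ 0` on entry: eax = 0 -/
  idle : stb_vorbis.last_seg u.mem f ≠ 0 → v.reg .rax = 0
  /-- eax ≠ 0: one segment was consumed, `bytes_in_seg` = eax, and μ is STRICTLY smaller (Lemma μ, cases b and c) -/
  segment : v.reg .rax ≠ 0 →
    stb_vorbis.bytes_in_seg v.mem f = (v.reg .rax).toNat ∧ mu v.mem f < mu u.mem f
  /-- eax = 0 ⇒ `bytes_in_seg` = 0 if it was 0 on entry -/
  empty : v.reg .rax = 0 → stb_vorbis.bytes_in_seg u.mem f = 0 → stb_vorbis.bytes_in_seg v.mem f = 0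

/-- **`next_segment(rdi = f)`** (CONTRACTS 48): pre `Bits f`. eax ∈ [0,255]. last_seg ≠ 0 on entry ⇒ eax = 0. Otherwise one
segment consumed: eax = segments[old next_seg] (after a successful start_page: segments[0]), bytes_in_seg = eax, next_seg′ = old+1
if < segment_count else −1 (N2); or eax = 0 with last_seg = 1 (start_page failed) or with error = 32. eax = 0 ⇒ bytes_in_seg = 0
if it was 0 on entry. `Bits f` kept. μ′ ≤ μ; μ′ < μ unless (last_seg ≠ 0 on entry ∨ start_page returned 0) — stated for
eax ≠ 0, which is what the loops on it test. (N2 is TRANSIENTLY violated inside the function; only its own walk sees it.)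
Footprint: start_page's + last_seg, last_seg_which, bytes_in_seg, next_seg; stack depth 240. (Not stated: the values of
last_seg / last_seg_which after the call — control flow only.) -/
def next_segment.spec (others : List Obj) (frames : List (Nat × FrameLayout)) (Blk : Block → Prop) (len : Nat) : Spec where
  pre u := ReaderPre others frames Blk len u
  post u v := NextSegmentPost Blk len (u.reg .rdi).toNat u v
  frame := 240
  writes u := Reader.winsSeg (u.reg .rdi).toNat

@[vspec] theorem next_segment.spec_frame (others : List Obj) (frames : List (Nat × FrameLayout)) (Blk : Block → Prop)
    (len : Nat) : (next_segment.spec others frames Blk len).frame = 240 := id rfl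

@[vspec] theorem next_segment.spec_writes (others : List Obj) (frames : List (Nat × FrameLayout)) (Blk : Block → Prop)
    (len : Nat) (u : State) : (next_segment.spec others frames Blk len).writes u =
      [⟨(u.reg .rdi).toNat + 48, (u.reg .rdi).toNat + 56⟩, ⟨(u.reg .rdi).toNat + 84, (u.reg .rdi).toNat + 96⟩,
       ⟨(u.reg .rdi).toNat + 136, (u.reg .rdi).toNat + 144⟩, ⟨(u.reg .rdi).toNat + 1484, (u.reg .rdi).toNat + 1749⟩,
       ⟨(u.reg .rdi).toNat + 1752, (u.reg .rdi).toNat + 1764⟩, ⟨(u.reg .rdi).toNat + 1776, (u.reg .rdi).toNat + 1784⟩] := id rfl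

/-! ### Packets: get8_packet_raw, get8_packet, get32_packet, flush_packet, start_packet, maybe_start_packet -/

/-- The value of eax = −1 (EOP) as the whole of rax (`mov eax, 0xffffffff` zero-extends). -/
def EOP : Word := 0xFFFFFFFF

/-- Unfolds `EOP`. -/
theorem EOP_def : EOP = 0xFFFFFFFF := id rfl

/-- `EOP` as a number. -/
theorem EOP_toNat : EOP.toNat = 0xFFFFFFFF := id rfl

/-- The postcondition of `get8_packet_raw`. -/
structure PacketRawPost (Blk : Block → Prop) (len : Nat) (f : Nat) (u v : State) : Prop where
  untouched : ShadowUntouched u.mem v.mem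
  reader : ReaderPost Blk len u.mem v.mem f
  /-- eax = −1 (EOP), or a byte -/
  result : v.reg .rax = EOP ∨ (v.reg .rax).toNat < 256
  /-- **a byte was returned: μ is STRICTLY smaller** (Lemma μ is proved here) -/
  strict : v.reg .rax ≠ EOP → mu v.mem f < mu u.mem f
  /-- EOP: `bytes_in_seg = 0` -/
  eop : v.reg .rax = EOP → stb_vorbis.bytes_in_seg v.mem f = 0
  /-- `valid_bits`, `acc` untouched -/
  bitsSame : stb_vorbis.valid_bits v.mem f = stb_vorbis.valid_bits u.mem f ∧ stb_vorbis.acc v.mem f = stb_vorbis.acc u.mem f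

/-- **`get8_packet_raw(rdi = f)`** (CONTRACTS 49): pre `Bits f`. eax = −1 (EOP) iff bytes_in_seg = 0 ∧ (last_seg ≠ 0 ∨
next_segment returned 0); μ′ ≤ μ then. Otherwise bytes_in_seg −= 1, packet_bytes += 1, eax = get8(f) ∈ [0,255] (0 at end of
file, no EOP), and μ′ < μ STRICTLY. `Bits f` kept. valid_bits, acc untouched. Footprint: next_segment's + bytes_in_seg,
packet_bytes, stream, eof; stack depth 256. -/
def get8_packet_raw.spec (others : List Obj) (frames : List (Nat × FrameLayout)) (Blk : Block → Prop) (len : Nat) : Spec where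
  pre u := ReaderPre others frames Blk len u
  post u v := PacketRawPost Blk len (u.reg .rdi).toNat u v
  frame := 256
  writes u := Reader.winsRaw (u.reg .rdi).toNat

@[vspec] theorem get8_packet_raw.spec_frame (others : List Obj) (frames : List (Nat × FrameLayout)) (Blk : Block → Prop)
    (len : Nat) : (get8_packet_raw.spec others frames Blk len).frame = 256 := id rfl

@[vspec] theorem get8_packet_raw.spec_writes (others : List Obj) (frames : List (Nat × FrameLayout)) (Blk : Block → Prop)
    (len : Nat) (u : State) : (get8_packet_raw.spec others frames Blk len).writes u =
      [⟨(u.reg .rdi).toNat + 48, (u.reg .rdi).toNat + 56⟩, ⟨(u.reg .rdi).toNat + 84, (u.reg .rdi).toNat + 96⟩,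
       ⟨(u.reg .rdi).toNat + 136, (u.reg .rdi).toNat + 144⟩, ⟨(u.reg .rdi).toNat + 1484, (u.reg .rdi).toNat + 1749⟩,
       ⟨(u.reg .rdi).toNat + 1752, (u.reg .rdi).toNat + 1764⟩, ⟨(u.reg .rdi).toNat + 1772, (u.reg .rdi).toNat + 1784⟩] := id rfl

/-- The postcondition of `get8_packet`. -/
structure Get8PacketPost (Blk : Block → Prop) (len : Nat) (f : Nat) (u v : State) : Prop where
  untouched : ShadowUntouched u.mem v.mem
  reader : ReaderPost Blk len u.mem v.mem f
  result : v.reg .rax = EOP ∨ (v.reg .rax).toNat < 256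
  strict : v.reg .rax ≠ EOP → mu v.mem f < mu u.mem f
  /-- `valid_bits = 0` (also resets −1 to 0) -/
  validBits : stb_vorbis.valid_bits v.mem f = 0

/-- **`get8_packet(rdi = f)`** (CONTRACTS 63): pre `Bits f`. eax = get8_packet_raw's result ∈ [0,255] ∪ {−1}; `valid_bits = 0`
(also resets −1 to 0). `Bits f` kept; μ as raw. Footprint: raw's + `[f+1768, f+1772)`; stack depth 288. -/
def get8_packet.spec (others : List Obj) (frames : List (Nat × FrameLayout)) (Blk : Block → Prop) (len : Nat) : Spec where
  pre u := ReaderPre others frames Blk len u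
  post u v := Get8PacketPost Blk len (u.reg .rdi).toNat u v
  frame := 288
  writes u := Reader.winsPacket (u.reg .rdi).toNat

@[vspec] theorem get8_packet.spec_frame (others : List Obj) (frames : List (Nat × FrameLayout)) (Blk : Block → Prop)
    (len : Nat) : (get8_packet.spec others frames Blk len).frame = 288 := id rfl

@[vspec] theorem get8_packet.spec_writes (others : List Obj) (frames : List (Nat × FrameLayout)) (Blk : Block → Prop)
    (len : Nat) (u : State) : (get8_packet.spec others frames Blk len).writes u =
      [⟨(u.reg .rdi).toNat + 48, (u.reg .rdi).toNat + 56⟩, ⟨(u.reg .rdi).toNat + 84, (u.reg .rdi).toNat + 96⟩,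
       ⟨(u.reg .rdi).toNat + 136, (u.reg .rdi).toNat + 144⟩, ⟨(u.reg .rdi).toNat + 1484, (u.reg .rdi).toNat + 1749⟩,
       ⟨(u.reg .rdi).toNat + 1752, (u.reg .rdi).toNat + 1764⟩, ⟨(u.reg .rdi).toNat + 1768, (u.reg .rdi).toNat + 1784⟩] := id rfl

/-- The postcondition of `get32_packet`. -/
structure Get32PacketPost (Blk : Block → Prop) (len : Nat) (f : Nat) (u v : State) : Prop where
  untouched : ShadowUntouched u.mem v.mem
  reader : ReaderPost Blk len u.mem v.mem f
  /-- eax = ANY 32-bit value (an EOP contributes FF…FF shifted in): callers must range-check it (FIX 1, FIX 2) -/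
  result : (v.reg .rax).toNat < 2 ^ 32
  validBits : stb_vorbis.valid_bits v.mem f = 0

/-- **`get32_packet(rdi = f)`** (CONTRACTS 112; FIX 13): pre `Bits f`. eax = ANY 32-bit value; callers must range-check it.
`Bits f` kept; μ not increased. Footprint: get8_packet's; stack depth 320. -/
def get32_packet.spec (others : List Obj) (frames : List (Nat × FrameLayout)) (Blk : Block → Prop) (len : Nat) : Spec where
  pre u := ReaderPre others frames Blk len u
  post u v := Get32PacketPost Blk len (u.reg .rdi).toNat u v
  frame := 320
  writes u := Reader.winsPacket (u.reg .rdi).toNat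

@[vspec] theorem get32_packet.spec_frame (others : List Obj) (frames : List (Nat × FrameLayout)) (Blk : Block → Prop)
    (len : Nat) : (get32_packet.spec others frames Blk len).frame = 320 := id rfl

@[vspec] theorem get32_packet.spec_writes (others : List Obj) (frames : List (Nat × FrameLayout)) (Blk : Block → Prop)
    (len : Nat) (u : State) : (get32_packet.spec others frames Blk len).writes u =
      [⟨(u.reg .rdi).toNat + 48, (u.reg .rdi).toNat + 56⟩, ⟨(u.reg .rdi).toNat + 84, (u.reg .rdi).toNat + 96⟩,
       ⟨(u.reg .rdi).toNat + 136, (u.reg .rdi).toNat + 144⟩, ⟨(u.reg .rdi).toNat + 1484, (u.reg .rdi).toNat + 1749⟩,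
       ⟨(u.reg .rdi).toNat + 1752, (u.reg .rdi).toNat + 1764⟩, ⟨(u.reg .rdi).toNat + 1768, (u.reg .rdi).toNat + 1784⟩] := id rfl

/-- The postcondition of `flush_packet`. -/
structure FlushPost (Blk : Block → Prop) (len : Nat) (f : Nat) (u v : State) : Prop where
  untouched : ShadowUntouched u.mem v.mem
  reader : ReaderPost Blk len u.mem v.mem f
  /-- the last get8_packet_raw returned EOP: `bytes_in_seg = 0` -/
  drained : stb_vorbis.bytes_in_seg v.mem f = 0
  /-- `valid_bits`, `acc` untouched -/
  bitsSame : stb_vorbis.valid_bits v.mem f = stb_vorbis.valid_bits u.mem f ∧ stb_vorbis.acc v.mem f = stb_vorbis.acc u.mem f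

/-- **`flush_packet(rdi = f)`** (CONTRACTS 61): pre `Bits f`. Returns nothing. `Bits f` kept. `bytes_in_seg = 0` (= the last
get8_packet_raw returned EOP). μ not increased. Loop `while (get8_packet_raw(f) != EOP);`: measure μ. Footprint: what
get8_packet_raw writes; stack depth 272. -/
def flush_packet.spec (others : List Obj) (frames : List (Nat × FrameLayout)) (Blk : Block → Prop) (len : Nat) : Spec where
  pre u := ReaderPre others frames Blk len u
  post u v := FlushPost Blk len (u.reg .rdi).toNat u v
  frame := 272
  writes u := Reader.winsRaw (u.reg .rdi).toNat

@[vspec] theorem flush_packet.spec_frame (others : List Obj) (frames : List (Nat × FrameLayout)) (Blk : Block → Prop)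
    (len : Nat) : (flush_packet.spec others frames Blk len).frame = 272 := id rfl

@[vspec] theorem flush_packet.spec_writes (others : List Obj) (frames : List (Nat × FrameLayout)) (Blk : Block → Prop)
    (len : Nat) (u : State) : (flush_packet.spec others frames Blk len).writes u =
      [⟨(u.reg .rdi).toNat + 48, (u.reg .rdi).toNat + 56⟩, ⟨(u.reg .rdi).toNat + 84, (u.reg .rdi).toNat + 96⟩,
       ⟨(u.reg .rdi).toNat + 136, (u.reg .rdi).toNat + 144⟩, ⟨(u.reg .rdi).toNat + 1484, (u.reg .rdi).toNat + 1749⟩,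
       ⟨(u.reg .rdi).toNat + 1752, (u.reg .rdi).toNat + 1764⟩, ⟨(u.reg .rdi).toNat + 1772, (u.reg .rdi).toNat + 1784⟩] := id rfl

/-- The postcondition of `start_packet` and `maybe_start_packet`. -/
structure StartPacketPost (Blk : Block → Prop) (len : Nat) (f : Nat) (u v : State) : Prop where
  untouched : ShadowUntouched u.mem v.mem
  reader : ReaderPost Blk len u.mem v.mem f
  result : v.reg .rax = 0 ∨ v.reg .rax = 1
  /-- eax = 1: a packet is open — `next_seg ≠ −1`, `last_seg = 0`, `valid_bits = 0`, `packet_bytes = 0`, `bytes_in_seg = 0` -/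
  started : v.reg .rax = 1 →
    stb_vorbis.next_seg v.mem f ≠ -1 ∧ stb_vorbis.last_seg v.mem f = 0 ∧ stb_vorbis.valid_bits v.mem f = 0 ∧
    stb_vorbis.packet_bytes v.mem f = 0 ∧ stb_vorbis.bytes_in_seg v.mem f = 0

/-- **`start_packet(rdi = f)`** (CONTRACTS 64): pre `Bits f` (start_page is reached only with next_seg = −1). eax = 0
(start_page failed, or error = 32 for a page with the continued flag) or eax = 1 with next_seg ≠ −1, last_seg = 0,
valid_bits = 0, packet_bytes = 0, bytes_in_seg = 0. `Bits f` kept; μ′ ≤ μ. Loop `while (f->next_seg == -1)`: at most one full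
round. Footprint: start_page's + last_seg, valid_bits, packet_bytes, bytes_in_seg, error; stack depth 208. -/
def start_packet.spec (others : List Obj) (frames : List (Nat × FrameLayout)) (Blk : Block → Prop) (len : Nat) : Spec where
  pre u := ReaderPre others frames Blk len u
  post u v := StartPacketPost Blk len (u.reg .rdi).toNat u v
  frame := 208
  writes u := Reader.winsStart (u.reg .rdi).toNat

@[vspec] theorem start_packet.spec_frame (others : List Obj) (frames : List (Nat × FrameLayout)) (Blk : Block → Prop)
    (len : Nat) : (start_packet.spec others frames Blk len).frame = 208 := id rfl

@[vspec] theorem start_packet.spec_writes (others : List Obj) (frames : List (Nat × FrameLayout)) (Blk : Block → Prop)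
    (len : Nat) (u : State) : (start_packet.spec others frames Blk len).writes u =
      [⟨(u.reg .rdi).toNat + 48, (u.reg .rdi).toNat + 56⟩, ⟨(u.reg .rdi).toNat + 84, (u.reg .rdi).toNat + 96⟩,
       ⟨(u.reg .rdi).toNat + 136, (u.reg .rdi).toNat + 144⟩, ⟨(u.reg .rdi).toNat + 1484, (u.reg .rdi).toNat + 1749⟩,
       ⟨(u.reg .rdi).toNat + 1752, (u.reg .rdi).toNat + 1760⟩, ⟨(u.reg .rdi).toNat + 1768, (u.reg .rdi).toNat + 1784⟩] := id rfl

/-- **`maybe_start_packet(rdi = f)`** (CONTRACTS 65): pre `Bits f`. eax = 0: eof set (at a page boundary), or error = 30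
(capture pattern), or start_page_no_capturepattern's failure, or error = 32 after last_seg := 0, bytes_in_seg := 0 (continued
flag); or eax = start_packet's result. `Bits f` kept; μ′ ≤ μ (the four get8 results equal the non-zero constants 4f 67 67 53 only
if each really advanced: R down by 4 before start_page_no_capturepattern, which is called only with next_seg = −1). Footprint:
start_packet's + start_page_no_capturepattern's; stack depth 240. -/
def maybe_start_packet.spec (others : List Obj) (frames : List (Nat × FrameLayout)) (Blk : Block → Prop) (len : Nat) :
    Spec where
  pre u := ReaderPre others frames Blk len u
  post u v := StartPacketPost Blk len (u.reg .rdi).toNat u v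
  frame := 240
  writes u := Reader.winsStart (u.reg .rdi).toNat

@[vspec] theorem maybe_start_packet.spec_frame (others : List Obj) (frames : List (Nat × FrameLayout)) (Blk : Block → Prop)
    (len : Nat) : (maybe_start_packet.spec others frames Blk len).frame = 240 := id rfl

@[vspec] theorem maybe_start_packet.spec_writes (others : List Obj) (frames : List (Nat × FrameLayout)) (Blk : Block → Prop)
    (len : Nat) (u : State) : (maybe_start_packet.spec others frames Blk len).writes u =
      [⟨(u.reg .rdi).toNat + 48, (u.reg .rdi).toNat + 56⟩, ⟨(u.reg .rdi).toNat + 84, (u.reg .rdi).toNat + 96⟩,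
       ⟨(u.reg .rdi).toNat + 136, (u.reg .rdi).toNat + 144⟩, ⟨(u.reg .rdi).toNat + 1484, (u.reg .rdi).toNat + 1749⟩,
       ⟨(u.reg .rdi).toNat + 1752, (u.reg .rdi).toNat + 1760⟩, ⟨(u.reg .rdi).toNat + 1768, (u.reg .rdi).toNat + 1784⟩] := id rfl

/-! ### The bit reader: get_bits (two stages), prep_huffman -/

/-- The `int n` of `get_bits(f, n)`, read as an unsigned number (the precondition bounds it by 24 or 32, so the sign is moot). -/
def bitsArg (u : State) : Nat := (u.reg .rsi).toNat % 2 ^ 32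

/-- Unfolds `bitsArg`. -/
theorem bitsArg_def (u : State) : bitsArg u = (u.reg .rsi).toNat % 2 ^ 32 := id rfl

/-- The postcondition of `get_bits`, both stages: SH8 and `GetBitsPost` (Vorbis/Bits.lean §8) with `z` = the whole of rax. -/
structure GetBitsSpecPost (Blk : Block → Prop) (len : Nat) (f n : Nat) (u v : State) : Prop where
  untouched : ShadowUntouched u.mem v.mem
  /-- `Bits` kept · `z < 2^32`, `z < 2^n` for `n ≤ 31` · μ not increased · `valid_bits < 0` on entry: 0, nothing written ·
  PROGRESS from `valid_bits = 0`, `n ≥ 1`: end of packet (`z = 0`, `valid_bits′ = −1`) or μ strictly smaller -/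
  bits : GetBitsPost Blk len u.mem v.mem f n (v.reg .rax).toNat

/-- **`get_bits(rdi = f, esi = n)`, STAGE 1: `n ≤ 24`** (CONTRACTS 50: "Spec_24 := this contract restricted to n ≤ 24 (the arm
0x10d26c is unreachable: `cmp r12d,0x18; jg`)"). Stack depth 304 (no recursion). -/
def get_bits.spec24 (others : List Obj) (frames : List (Nat × FrameLayout)) (Blk : Block → Prop) (len : Nat) : Spec where
  pre u := ReaderPre others frames Blk len u ∧ bitsArg u ≤ 24
  post u v := GetBitsSpecPost Blk len (u.reg .rdi).toNat (bitsArg u) u v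
  frame := 304
  writes u := Reader.winsBits (u.reg .rdi).toNat

@[vspec] theorem get_bits.spec24_frame (others : List Obj) (frames : List (Nat × FrameLayout)) (Blk : Block → Prop)
    (len : Nat) : (get_bits.spec24 others frames Blk len).frame = 304 := id rfl

@[vspec] theorem get_bits.spec24_writes (others : List Obj) (frames : List (Nat × FrameLayout)) (Blk : Block → Prop)
    (len : Nat) (u : State) : (get_bits.spec24 others frames Blk len).writes u =
      [⟨(u.reg .rdi).toNat + 48, (u.reg .rdi).toNat + 56⟩, ⟨(u.reg .rdi).toNat + 84, (u.reg .rdi).toNat + 96⟩,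
       ⟨(u.reg .rdi).toNat + 136, (u.reg .rdi).toNat + 144⟩, ⟨(u.reg .rdi).toNat + 1484, (u.reg .rdi).toNat + 1749⟩,
       ⟨(u.reg .rdi).toNat + 1752, (u.reg .rdi).toNat + 1784⟩] := id rfl

/-- **`get_bits(rdi = f, esi = n)`, THE CONTRACT: `0 ≤ n ≤ 32`** (CONTRACTS 50; DECISIONS D-3). valid_bits < 0 on entry: eax = 0,
NOTHING written. Else eax = z with z < 2^n for n ≤ 31 (any u32 for n = 32); V1 kept; `Bits f` kept; μ′ ≤ μ; PROGRESS:
valid_bits = 0 ∧ n ≥ 1 on entry ⇒ (eax = 0 ∧ valid_bits′ = −1) ∨ μ′ < μ. Proved with `get_bits.spec24` as the contract of BOTH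
recursive calls (arguments 24 and n − 24 ∈ [1,8]); `GetBitsPost.combine` puts the two posts together. Footprint: acc, valid_bits +
get8_packet_raw's; stack: 48 bytes own + 304 of the callee = 352 (one level of self-recursion). -/
def get_bits.spec (others : List Obj) (frames : List (Nat × FrameLayout)) (Blk : Block → Prop) (len : Nat) : Spec where
  pre u := ReaderPre others frames Blk len u ∧ bitsArg u ≤ 32
  post u v := GetBitsSpecPost Blk len (u.reg .rdi).toNat (bitsArg u) u v
  frame := 352
  writes u := Reader.winsBits (u.reg .rdi).toNat

@[vspec] theorem get_bits.spec_frame (others : List Obj) (frames : List (Nat × FrameLayout)) (Blk : Block → Prop)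
    (len : Nat) : (get_bits.spec others frames Blk len).frame = 352 := id rfl

@[vspec] theorem get_bits.spec_writes (others : List Obj) (frames : List (Nat × FrameLayout)) (Blk : Block → Prop)
    (len : Nat) (u : State) : (get_bits.spec others frames Blk len).writes u =
      [⟨(u.reg .rdi).toNat + 48, (u.reg .rdi).toNat + 56⟩, ⟨(u.reg .rdi).toNat + 84, (u.reg .rdi).toNat + 96⟩,
       ⟨(u.reg .rdi).toNat + 136, (u.reg .rdi).toNat + 144⟩, ⟨(u.reg .rdi).toNat + 1484, (u.reg .rdi).toNat + 1749⟩,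
       ⟨(u.reg .rdi).toNat + 1752, (u.reg .rdi).toNat + 1784⟩] := id rfl

/-- The postcondition of `prep_huffman`. -/
structure PrepHuffmanPost (Blk : Block → Prop) (len : Nat) (f : Nat) (u v : State) : Prop where
  untouched : ShadowUntouched u.mem v.mem
  /-- `Bits f` kept (V1: `valid_bits ≤ 32`, also from `valid_bits = −1`); μ not increased -/
  reader : ReaderPost Blk len u.mem v.mem f
  /-- `valid_bits < 0` or `> 24` on entry (ONE unsigned test): nothing is written -/
  idle : (stb_vorbis.valid_bits u.mem f < 0 ∨ 24 < stb_vorbis.valid_bits u.mem f) →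
    stb_vorbis.valid_bits v.mem f = stb_vorbis.valid_bits u.mem f ∧ stb_vorbis.acc v.mem f = stb_vorbis.acc u.mem f
  /-- otherwise bytes are added: `valid_bits′ ∈ [valid_bits, 32]` (the upper bound is V1 of `reader.bits`) -/
  grown : 0 ≤ stb_vorbis.valid_bits u.mem f → stb_vorbis.valid_bits u.mem f ≤ stb_vorbis.valid_bits v.mem f

/-- **`prep_huffman(rdi = f)`** (CONTRACTS 51; FIX 21): pre `Bits f`. `Bits f` kept; μ′ ≤ μ. `valid_bits < 0` or `> 24` on entry
(one UNSIGNED test `cmp eax,0x18 ; ja exit`: −1 is 0xFFFFFFFF): nothing is written. Otherwise (0 ≤ valid_bits ≤ 24): `acc := 0`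
first if valid_bits = 0, then bytes are added while valid_bits ≤ 24: valid_bits′ ∈ [valid_bits, 32]; acc any. Footprint: acc,
valid_bits + get8_packet_raw's; stack depth 288. -/
def prep_huffman.spec (others : List Obj) (frames : List (Nat × FrameLayout)) (Blk : Block → Prop) (len : Nat) : Spec where
  pre u := ReaderPre others frames Blk len u
  post u v := PrepHuffmanPost Blk len (u.reg .rdi).toNat u v
  frame := 288
  writes u := Reader.winsBits (u.reg .rdi).toNat

@[vspec] theorem prep_huffman.spec_frame (others : List Obj) (frames : List (Nat × FrameLayout)) (Blk : Block → Prop)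
    (len : Nat) : (prep_huffman.spec others frames Blk len).frame = 288 := id rfl

@[vspec] theorem prep_huffman.spec_writes (others : List Obj) (frames : List (Nat × FrameLayout)) (Blk : Block → Prop)
    (len : Nat) (u : State) : (prep_huffman.spec others frames Blk len).writes u =
      [⟨(u.reg .rdi).toNat + 48, (u.reg .rdi).toNat + 56⟩, ⟨(u.reg .rdi).toNat + 84, (u.reg .rdi).toNat + 96⟩,
       ⟨(u.reg .rdi).toNat + 136, (u.reg .rdi).toNat + 144⟩, ⟨(u.reg .rdi).toNat + 1484, (u.reg .rdi).toNat + 1749⟩,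
       ⟨(u.reg .rdi).toNat + 1752, (u.reg .rdi).toNat + 1784⟩] := id rfl

end Vorbis.Spec
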